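-- pv_equiv track=rewrite | github.com/nderkach/algorithmic-challenges | monkey_river.py | inner
-- ===== SOURCE A (Python) =====
-- def inner(e, _a, d, pos):
--     _a[pos[e]] = 1
--     gap = 0
--     for c in _a:
--         gap += 1
--         if gap > d:
--             return False
--         if c == 1:
--             gap = 0
--     if gap >= d:
--         return False
--     return True
-- ===== SOURCE B (Python) =====
-- def inner(e, _a, d, pos):
--     _a[pos[e]] = 1
--     ones = [i for i, c in enumerate(_a) if c == 1]
--     if ones[0] + 1 > d:
--         return False
--     if any(b - a > d for a, b in zip(ones, ones[1:])):
--         return False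
--     return len(_a) - 1 - ones[-1] < d
-- ===== Notes on version B (the rewrite author's own statement) =====
-- stated objective: alternative
-- what changed: Replaces A's single scan with a running gap counter (reset at each 1, early-exit) by building the list of marked indices once and checking the leading gap, the consecutive index differences, and the trailing gap against d.
-- outside the precondition, e.g. on inner(0, [5], 3, [2]): A raises IndexError, B raises IndexError; on inner(3, [0, 0], 2, [1]): A raises IndexError, B raises IndexError
import Mathlib
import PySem

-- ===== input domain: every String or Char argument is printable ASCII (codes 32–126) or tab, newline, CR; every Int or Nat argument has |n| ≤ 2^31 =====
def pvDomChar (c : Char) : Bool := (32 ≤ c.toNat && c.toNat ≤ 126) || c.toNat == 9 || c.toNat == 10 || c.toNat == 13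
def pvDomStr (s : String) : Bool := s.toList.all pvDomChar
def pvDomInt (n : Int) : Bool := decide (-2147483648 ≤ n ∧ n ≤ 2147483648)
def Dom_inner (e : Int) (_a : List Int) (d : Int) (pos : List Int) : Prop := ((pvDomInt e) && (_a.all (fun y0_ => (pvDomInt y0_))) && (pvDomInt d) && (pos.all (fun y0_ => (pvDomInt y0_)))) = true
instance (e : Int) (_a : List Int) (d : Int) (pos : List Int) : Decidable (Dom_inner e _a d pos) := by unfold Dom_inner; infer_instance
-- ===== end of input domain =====

-- B replaces A's running reset-counter scan by an index table of marked positions and a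
-- gap-difference check over consecutive marks (objective: alternative decomposition).
-- Both A and B mutate `_a` in place identically (`_a[pos[e]] = 1`); the equivalence proved
-- here is about the return value.

-- ===== PORT A =====
-- A's for-loop with early returns, as structural recursion over the list with the running gap.
def innerLoop (d : Int) : List Int → Int → Bool
  | [], gap => !decide (gap ≥ d)
  | c :: rest, gap =>
    if gap + 1 > d then false
    else innerLoop d rest (if c = 1 then 0 else gap + 1)

def inner (e : Int) (_a : List Int) (d : Int) (pos : List Int) : Bool :=
  innerLoop d (PySem.List.pySetD _a (PySem.List.pyGetD pos e 0) 1) 0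

-- ===== PORT B =====
-- [i for i, c in enumerate(a) if c == 1], carrying the running index.
def marks : List Int → Int → List Int
  | [], _ => []
  | c :: rest, i => if c = 1 then i :: marks rest (i + 1) else marks rest (i + 1)

def altCheck (d : Int) (a : List Int) : Bool :=
  match marks a 0 with
  | [] => false  -- unreachable under Pre_: the assignment puts a 1 in a (Python B would raise here)
  | o0 :: rest =>
    if o0 + 1 > d then false
    else if ((o0 :: rest).zip rest).any (fun p => decide (p.2 - p.1 > d)) then false
    else decide ((a.length : Int) - 1 - rest.getLastD o0 < d)

def inner_alt (e : Int) (_a : List Int) (d : Int) (pos : List Int) : Bool :=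
  altCheck d (PySem.List.pySetD _a (PySem.List.pyGetD pos e 0) 1)

-- ===== PRECONDITION & SPEC =====
-- Pre_ excludes exactly the IndexError inputs of A: e must be a valid (possibly negative)
-- index into pos, and pos[e] a valid index into _a.
def Pre_inner (e : Int) (_a : List Int) (d : Int) (pos : List Int) : Prop :=
  PySem.Raise.InRange pos.length e ∧ PySem.Raise.InRange _a.length (PySem.List.pyGetD pos e 0)
instance (e : Int) (_a : List Int) (d : Int) (pos : List Int) : Decidable (Pre_inner e _a d pos) := by unfold Pre_inner; infer_instance

def pvWitness_inner : Int × List Int × Int × List Int := (0, [0], 1, [0])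

def Spec_inner (e : Int) (_a : List Int) (d : Int) (pos : List Int) (out : Bool) : Prop := out = inner_alt e _a d pos
instance (e : Int) (_a : List Int) (d : Int) (pos : List Int) (out : Bool) : Decidable (Spec_inner e _a d pos out) := by unfold Spec_inner; infer_instance

-- ===== CLAIM (what is proved, stated in full; the proofs are below) =====
def Claim_equal_inner : Prop := ∀ (e : Int) (_a : List Int) (d : Int) (pos : List Int), Dom_inner e _a d pos → Pre_inner e _a d pos → Spec_inner e _a d pos (inner e _a d pos)

-- ===== LEMMAS AND PROOFS =====

-- B's gap check, generalized over the starting gap g of A's loop.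
def specB (d : Int) (n : Int) (ones : List Int) (g : Int) : Bool :=
  match ones with
  | [] => decide (g + n < d)
  | o0 :: rest =>
    if g + o0 + 1 > d then false
    else if ((o0 :: rest).zip rest).any (fun p => decide (p.2 - p.1 > d)) then false
    else decide (n - 1 - rest.getLastD o0 < d)

lemma marks_shift (l : List Int) : ∀ s : Int, marks l (s + 1) = (marks l s).map (· + 1) := by
  induction l with
  | nil => intro s; simp [marks]
  | cons c rest ih =>
    intro s
    by_cases hc : c = 1 <;> simp [marks, hc, ih (s + 1), ih s]

lemma getLastD_map_add (rest : List Int) : ∀ o0 : Int,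
    (rest.map (· + 1)).getLastD (o0 + 1) = rest.getLastD o0 + 1 := by
  induction rest with
  | nil => intro o0; simp
  | cons x xs ih => intro o0; simp only [List.map_cons, List.getLastD_cons]; exact ih x

lemma zipany_map_add (o0 : Int) (rest : List Int) (d : Int) :
    (((o0 + 1) :: rest.map (· + 1)).zip (rest.map (· + 1))).any (fun p => decide (p.2 - p.1 > d))
      = ((o0 :: rest).zip rest).any (fun p => decide (p.2 - p.1 > d)) := by
  rw [show ((o0 + 1) :: rest.map (· + 1)) = (o0 :: rest).map (· + 1) from by simp,
    List.zip_map, List.any_map]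
  congr 1
  funext p
  simp only [Function.comp_apply, Prod.map_fst, Prod.map_snd, decide_eq_decide]
  omega

lemma specB_cons_mark (d : Int) (n g : Int) (ms : List Int) :
    specB d (n + 1) (0 :: ms.map (· + 1)) g = if g + 1 > d then false else specB d n ms 0 := by
  rcases ms with _ | ⟨r0, rr⟩
  · simp only [specB, List.map_nil, List.zip_nil_right, List.any_nil, List.getLastD_nil]
    by_cases h1 : g + 1 > d
    · rw [if_pos (show g + 0 + 1 > d by omega), if_pos h1]
    · rw [if_neg (show ¬ (g + 0 + 1 > d) by omega), if_neg h1, if_neg (by simp),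
        decide_eq_decide]
      omega
  · simp only [specB, List.map_cons, List.zip_cons_cons, List.any_cons, List.getLastD_cons]
    rw [zipany_map_add r0 rr d, getLastD_map_add rr r0]
    by_cases h1 : g + 1 > d
    · rw [if_pos (show g + 0 + 1 > d by omega), if_pos h1]
    · rw [if_neg (show ¬ (g + 0 + 1 > d) by omega), if_neg h1]
      by_cases h2 : (0:Int) + r0 + 1 > d
      · have ht : decide (r0 + 1 - 0 > d) = true := by
          simp only [decide_eq_true_eq]; omega
        rw [ht, if_pos h2]
        simp
      · have hf : decide (r0 + 1 - 0 > d) = false := by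
          simp only [decide_eq_false_iff_not]; omega
        rw [hf, if_neg h2]
        simp only [Bool.false_or]
        by_cases h3 : (((r0 :: rr).zip rr).any fun p => decide (p.2 - p.1 > d)) = true
        · rw [if_pos h3, if_pos h3]
        · rw [if_neg h3, if_neg h3, decide_eq_decide]
          omega

lemma specB_cons_skip (d : Int) (n g : Int) (hn : 0 ≤ n) (ms : List Int)
    (hms : ∀ x ∈ ms, 0 ≤ x) :
    specB d (n + 1) (ms.map (· + 1)) g = if g + 1 > d then false else specB d n ms (g + 1) := by
  rcases ms with _ | ⟨r0, rr⟩
  · simp only [specB, List.map_nil]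
    by_cases h1 : g + 1 > d
    · rw [if_pos h1]
      simp only [decide_eq_false_iff_not]
      omega
    · rw [if_neg h1, decide_eq_decide]
      omega
  · simp only [specB, List.map_cons]
    rw [zipany_map_add r0 rr d, getLastD_map_add rr r0]
    have hr0 : 0 ≤ r0 := hms r0 List.mem_cons_self
    by_cases h1 : g + 1 > d
    · rw [if_pos (show g + (r0 + 1) + 1 > d by omega), if_pos h1]
    · rw [if_neg h1]
      by_cases h2 : g + 1 + r0 + 1 > d
      · rw [if_pos (show g + (r0 + 1) + 1 > d by omega), if_pos h2]
      · rw [if_neg (show ¬ (g + (r0 + 1) + 1 > d) by omega), if_neg h2]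
        by_cases h3 : (((r0 :: rr).zip rr).any fun p => decide (p.2 - p.1 > d)) = true
        · rw [if_pos h3, if_pos h3]
        · rw [if_neg h3, if_neg h3, decide_eq_decide]
          omega

lemma marks_nonneg (l : List Int) : ∀ s : Int, ∀ x ∈ marks l s, s ≤ x := by
  induction l with
  | nil => intro s x hx; simp [marks] at hx
  | cons c rest ih =>
    intro s x hx
    by_cases hc : c = 1
    · simp only [marks, if_pos hc, List.mem_cons] at hx
      rcases hx with rfl | hx
      · exact le_refl x
      · have := ih (s + 1) x hx; omega
    · simp only [marks, if_neg hc] at hx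
      have := ih (s + 1) x hx; omega

lemma loop_eq (d : Int) : ∀ (l : List Int) (g : Int),
    innerLoop d l g = specB d (l.length : Int) (marks l 0) g := by
  intro l
  induction l with
  | nil =>
    intro g
    simp only [innerLoop, marks, specB, List.length_nil, Int.natCast_zero]
    rw [← decide_not, decide_eq_decide]
    omega
  | cons c rest ih =>
    intro g
    have hshift : marks rest (0 + 1) = (marks rest 0).map (· + 1) := marks_shift rest 0
    have hlen : (((c :: rest).length : Nat) : Int) = (rest.length : Int) + 1 := by
      simp only [List.length_cons]; push_cast; ring
    by_cases hc : c = 1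
    · simp only [innerLoop, marks, if_pos hc, hshift, hlen]
      rw [specB_cons_mark, ih 0]
    · simp only [innerLoop, marks, if_neg hc, hshift, hlen]
      rw [specB_cons_skip d _ g (by omega) _ (marks_nonneg rest 0), ih (g + 1)]

lemma marks_ne_nil {l : List Int} (h : (1:Int) ∈ l) : ∀ s : Int, marks l s ≠ [] := by
  induction l with
  | nil => cases h
  | cons c rest ih =>
    intro s
    by_cases hc : c = 1
    · simp [marks, hc]
    · have hr : (1:Int) ∈ rest := by
        rcases List.mem_cons.mp h with h1 | h2
        · exact absurd h1.symm hc
        · exact h2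
      simp [marks, hc, ih hr]

lemma one_mem_pySetD (xs : List Int) (i : Int) (h : PySem.Raise.InRange xs.length i) :
    (1:Int) ∈ PySem.List.pySetD xs i 1 := by
  obtain ⟨h1, h2⟩ := h
  unfold PySem.List.pySetD PySem.List.pySet? PySem.List.pyIdx?
  by_cases h0 : 0 ≤ i
  · rw [if_pos h0, if_pos h2]
    simp only [Option.map_some, Option.getD_some]
    have hk : i.toNat < xs.length := by omega
    refine List.mem_iff_getElem.mpr ⟨i.toNat, by simpa using hk, ?_⟩
    simp
  · rw [if_neg h0, if_pos h1]
    simp only [Option.map_some, Option.getD_some]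
    have hk : xs.length - (-i).toNat < xs.length := by omega
    refine List.mem_iff_getElem.mpr ⟨xs.length - (-i).toNat, by simpa using hk, ?_⟩
    simp

-- ===== VERDICT (by name: the statement is the Claim_ definition above) =====
theorem inner_spec : Claim_equal_inner := by
  intro e _a d pos _ hpre
  unfold Spec_inner _root_.inner inner_alt
  have hone := one_mem_pySetD _a (PySem.List.pyGetD pos e 0) hpre.2
  set a := PySem.List.pySetD _a (PySem.List.pyGetD pos e 0) 1 with ha
  rw [loop_eq]
  rcases hm : marks a 0 with _ | ⟨o0, rest⟩
  · exact absurd hm (marks_ne_nil hone 0)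
  · simp only [specB, altCheck, hm]
    rw [show (0:Int) + o0 + 1 = o0 + 1 from by ring]
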